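-- pv_equiv track=rewrite | github.com/irhooshyar/standard | scripts/Persian/DocActorsGraphExtractor.py | get_top_common_keywords
-- ===== SOURCE A (Python) =====
-- import heapq
--
-- def get_top_common_keywords(actor1, actor2):
--     top = 10
--     keywords = {}
--     for key in actor1.keys():
--         if key in actor2.keys():
--             keywords[key] = min(actor1[key], actor2[key])
--     top_keys = heapq.nlargest(top, keywords, key=keywords.get)
--     return {key: f'{actor1[key]} , {actor2[key]}' for key in top_keys}
-- ===== SOURCE B (Python) =====
-- def get_top_common_keywords(actor1, actor2):
--     # single pass: keep at most 10 (key, v1, v2) triples, descending by min(v1, v2),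
--     # inserting each new triple after all entries with an equal-or-larger min
--     best = []
--     for key, v1 in actor1.items():
--         if key in actor2:
--             v2 = actor2[key]
--             m = min(v1, v2)
--             i = 0
--             while i < len(best) and min(best[i][1], best[i][2]) >= m:
--                 i += 1
--             best.insert(i, (key, v1, v2))
--             del best[10:]
--     return {k: f'{a} , {b}' for k, a, b in best}
-- ===== Notes on version B (the rewrite author's own statement) =====
-- stated objective: alternative
-- what changed: Replaces the dict-of-minima plus heapq.nlargest pipeline by a single pass over actor1.items() that maintains a bounded (at most 10) value-descending list of (key, v1, v2) triples via linear insertion, with no intermediate keyword dict and no heap.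
import Mathlib
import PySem

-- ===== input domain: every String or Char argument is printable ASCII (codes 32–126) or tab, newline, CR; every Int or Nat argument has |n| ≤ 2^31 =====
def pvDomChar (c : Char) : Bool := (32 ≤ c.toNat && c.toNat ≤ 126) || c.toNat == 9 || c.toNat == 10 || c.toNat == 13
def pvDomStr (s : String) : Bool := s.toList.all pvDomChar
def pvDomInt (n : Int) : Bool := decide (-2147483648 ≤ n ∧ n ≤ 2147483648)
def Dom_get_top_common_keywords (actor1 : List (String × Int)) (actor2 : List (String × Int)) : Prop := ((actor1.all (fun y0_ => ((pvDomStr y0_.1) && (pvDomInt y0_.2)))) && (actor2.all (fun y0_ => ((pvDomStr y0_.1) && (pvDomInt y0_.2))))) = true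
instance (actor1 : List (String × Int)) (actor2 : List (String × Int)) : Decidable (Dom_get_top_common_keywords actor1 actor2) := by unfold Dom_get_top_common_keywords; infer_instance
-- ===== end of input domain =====

-- B drops the keyword dict and the heap selection: one pass over actor1.items() keeps a
-- bounded (≤ 10) value-descending list of (key, v1, v2) triples (objective: alternative).

-- ===== PORT A =====
-- heapq.nlargest(10, keywords, key=keywords.get) is ported by its documented semantics:
-- sorted(keywords, key=keywords.get, reverse=True)[:10].
def get_top_common_keywords (actor1 : List (String × Int)) (actor2 : List (String × Int)) : List (String × String) :=
  let d1 := PySem.Dict.mk actor1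
  let d2 := PySem.Dict.mk actor2
  let kw := d1.keys.foldl (fun (acc : PySem.Dict String Int) k =>
      if d2.contains k then acc.insert k (min (d1.getD k 0) (d2.getD k 0)) else acc) PySem.Dict.empty
  let top_keys := (PySem.List.sorted kw.keys (fun k => kw.getD k 0) true).take 10
  -- f'{actor1[key]} , {actor2[key]}' (the keys are present; getD's default is never used)
  top_keys.map (fun k => (k, PySem.Int.toStr (d1.getD k 0) ++ " , " ++ PySem.Int.toStr (d2.getD k 0)))

-- ===== PORT B =====
-- Source B's while-loop/insert: walk past entries whose min is ≥ m, then splice the triple in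
def pvBestIns (m : Int) (t : String × Int × Int) : List (String × Int × Int) → List (String × Int × Int)
  | [] => [t]
  | y :: ys => if m ≤ min y.2.1 y.2.2 then y :: pvBestIns m t ys else t :: y :: ys

def get_top_common_keywords_alt (actor1 : List (String × Int)) (actor2 : List (String × Int)) : List (String × String) :=
  let d1 := PySem.Dict.mk actor1
  let d2 := PySem.Dict.mk actor2
  let best := d1.items.foldl (fun (acc : List (String × Int × Int)) kv =>
      if d2.contains kv.1 then
        -- v2 = actor2[key]; m = min(v1, v2); insert; del best[10:]
        (pvBestIns (min kv.2 (d2.getD kv.1 0)) (kv.1, kv.2, d2.getD kv.1 0) acc).take 10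
      else acc) []
  best.map (fun t => (t.1, PySem.Int.toStr t.2.1 ++ " , " ++ PySem.Int.toStr t.2.2))

-- ===== PRECONDITION & SPEC =====
-- Pre_ excludes only association lists with duplicate keys, which do not represent any
-- Python dict (A's parameters are dicts, whose keys are distinct by construction).
def Pre_get_top_common_keywords (actor1 : List (String × Int)) (actor2 : List (String × Int)) : Prop :=
  (actor1.map Prod.fst).Nodup ∧ (actor2.map Prod.fst).Nodup
instance (actor1 : List (String × Int)) (actor2 : List (String × Int)) : Decidable (Pre_get_top_common_keywords actor1 actor2) := by unfold Pre_get_top_common_keywords; infer_instance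
def pvWitness_get_top_common_keywords : (List (String × Int)) × (List (String × Int)) :=
  ([("a", 3), ("c", 7)], [("a", 1), ("b", 2)])

def Spec_get_top_common_keywords (actor1 : List (String × Int)) (actor2 : List (String × Int)) (out : List (String × String)) : Prop := out = get_top_common_keywords_alt actor1 actor2
instance (actor1 : List (String × Int)) (actor2 : List (String × Int)) (out : List (String × String)) : Decidable (Spec_get_top_common_keywords actor1 actor2 out) := by unfold Spec_get_top_common_keywords; infer_instance

-- ===== CLAIM (what is proved, stated in full; the proofs are below) =====
def Claim_equal_get_top_common_keywords : Prop := ∀ (actor1 : List (String × Int)) (actor2 : List (String × Int)), Dom_get_top_common_keywords actor1 actor2 → Pre_get_top_common_keywords actor1 actor2 → Spec_get_top_common_keywords actor1 actor2 (get_top_common_keywords actor1 actor2)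

-- ===== LEMMAS AND PROOFS =====

-- a fold that skips the elements failing p is the fold over the filtered list
theorem foldl_if_filter {α β : Type} (p : α → Bool) (f : β → α → β) :
    ∀ (l : List α) (b : β),
      l.foldl (fun acc x => if p x then f acc x else acc) b = (l.filter p).foldl f b
  | [], b => rfl
  | x :: l, b => by
      by_cases h : p x <;> simp [h, foldl_if_filter p f l]

-- pvBestIns at m = key t IS PySem's insertBy for the reverse=True before-predicate
theorem pvBestIns_eq_insertBy (t : String × Int × Int) :
    ∀ (l : List (String × Int × Int)),
      pvBestIns (min t.2.1 t.2.2) t l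
        = PySem.List.insertBy (fun a b => decide (min b.2.1 b.2.2 < min a.2.1 a.2.2)) t l
  | [] => rfl
  | y :: ys => by
      simp only [pvBestIns, PySem.List.insertBy, decide_eq_true_eq]
      by_cases h : min t.2.1 t.2.2 ≤ min y.2.1 y.2.2
      · simp [h, not_lt.mpr h, pvBestIns_eq_insertBy t ys]
      · simp [h, lt_of_not_ge h]

theorem take_cons_take {α : Type} (y : α) (l : List α) (n : Nat) :
    (y :: l).take n = (y :: l.take n).take n := by
  cases n with
  | zero => simp
  | succ m => simp [List.take_take]

-- truncating the list before an insertion does not change the truncated result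
theorem take_insertBy {α : Type} (b : α → α → Bool) (x : α) :
    ∀ (l : List α) (n : Nat),
      (PySem.List.insertBy b x l).take n = (PySem.List.insertBy b x (l.take n)).take n
  | [], n => by simp [PySem.List.insertBy]
  | y :: l, 0 => by simp
  | y :: l, n+1 => by
      simp only [PySem.List.insertBy, List.take_succ_cons]
      by_cases h : b x y
      · simp only [h, if_true, List.take_succ_cons]
        exact congrArg (x :: ·) (take_cons_take y l n)
      · simp only [h, if_false, Bool.false_eq_true, List.take_succ_cons]
        exact congrArg (y :: ·) (take_insertBy b x l n)

-- the bounded-insertion fold is the truncated full insertion sort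
theorem trunc_fold {α : Type} (b : α → α → Bool) (n : Nat) (ks : List α) :
    ks.foldl (fun acc x => (PySem.List.insertBy b x acc).take n) []
      = (ks.foldl (fun acc x => PySem.List.insertBy b x acc) []).take n := by
  induction ks using List.reverseRecOn with
  | nil => simp
  | append_singleton l x ih =>
      simp only [List.foldl_append, List.foldl_cons, List.foldl_nil, ih]
      exact (take_insertBy b x _ n).symm

-- map fst commutes with one insertBy step when the two keys agree on all elements involved
theorem map_fst_insertBy (keyT : String × Int × Int → Int) (keyK : String → Int)
    (t : String × Int × Int) (ht : keyK t.1 = keyT t) :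
    ∀ (l : List (String × Int × Int)), (∀ y ∈ l, keyK y.1 = keyT y) →
      (PySem.List.insertBy (fun a b => decide (keyT b < keyT a)) t l).map (·.1)
        = PySem.List.insertBy (fun a b => decide (keyK b < keyK a)) t.1 (l.map (·.1))
  | [], _ => rfl
  | y :: ys, h => by
      have hy : keyK y.1 = keyT y := h y (by simp)
      simp only [PySem.List.insertBy, List.map_cons, ht, hy]
      by_cases hc : keyT y < keyT t
      · simp [hc]
      · simp [hc, map_fst_insertBy keyT keyK t ht ys (fun z hz => h z (by simp [hz]))]

-- map fst commutes with the reverse=True sort when the two keys agree on the list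
theorem map_fst_sorted (keyT : String × Int × Int → Int) (keyK : String → Int)
    (l : List (String × Int × Int)) (h : ∀ y ∈ l, keyK y.1 = keyT y) :
    (PySem.List.sorted l keyT true).map (·.1)
      = PySem.List.sorted (l.map (·.1)) keyK true := by
  rw [PySem.List.sorted_rev_eq_foldl_insertBy, PySem.List.sorted_rev_eq_foldl_insertBy]
  induction l using List.reverseRecOn with
  | nil => rfl
  | append_singleton l t ih =>
      simp only [List.foldl_append, List.foldl_cons, List.foldl_nil, List.map_append]
      rw [map_fst_insertBy keyT keyK t (h t (by simp))
            (l.foldl (fun acc x => PySem.List.insertBy (fun a b => decide (keyT b < keyT a)) x acc) [])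
            (fun y hy => h y (by
              have : y ∈ PySem.List.sorted l keyT true := by
                rw [PySem.List.sorted_rev_eq_foldl_insertBy]; exact hy
              simp [PySem.List.mem_sorted] at this
              simp [this])),
          ih (fun y hy => h y (by simp [hy]))]
      simp

-- ===== VERDICT (by name: the statement is the Claim_ definition above) =====
-- named pieces of both programs, used by the lemmas below
def pvCommon (actor1 : List (String × Int)) (d2 : PySem.Dict String Int) : List (String × Int × Int) :=
  (actor1.filter (fun kv => d2.contains kv.1)).map (fun kv => (kv.1, kv.2, d2.getD kv.1 0))

theorem mem_pvCommon {actor1 : List (String × Int)} {d2 : PySem.Dict String Int}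
    {t : String × Int × Int} (ht : t ∈ pvCommon actor1 d2)
    (hnd : (actor1.map Prod.fst).Nodup) :
    (PySem.Dict.mk actor1).getD t.1 0 = t.2.1 ∧ d2.getD t.1 0 = t.2.2 := by
  simp only [pvCommon, List.mem_map, List.mem_filter] at ht
  obtain ⟨kv, ⟨hkv, _⟩, rfl⟩ := ht
  refine ⟨PySem.Dict.getD_of_mem_items _ ?_ hnd 0, rfl⟩
  exact hkv

-- the keyword dict of A: items, keys and lookups
theorem kw_items (actor1 : List (String × Int)) (d2 : PySem.Dict String Int)
    (hnd : (actor1.map Prod.fst).Nodup) :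
    ((PySem.Dict.mk actor1).keys.foldl (fun (acc : PySem.Dict String Int) k =>
        if d2.contains k then acc.insert k (min ((PySem.Dict.mk actor1).getD k 0) (d2.getD k 0)) else acc)
      PySem.Dict.empty).items
      = ((actor1.map Prod.fst).filter (fun k => d2.contains k)).map
          (fun k => (k, min ((PySem.Dict.mk actor1).getD k 0) (d2.getD k 0))) := by
  rw [foldl_if_filter]
  rw [PySem.Dict.items_foldl_insert_fresh _ (fun k => k) _ _ (fun a _ => PySem.Dict.contains_empty a)
        (by simpa using hnd.filter (fun k => d2.contains k))]
  rfl

theorem map_fst_pvCommon (actor1 : List (String × Int)) (d2 : PySem.Dict String Int) :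
    (pvCommon actor1 d2).map (·.1) = (actor1.map Prod.fst).filter (fun k => d2.contains k) := by
  simp only [pvCommon, List.map_map, List.filter_map]
  rfl

-- ===== VERDICT (by name: the statement is the Claim_ definition above) =====
theorem get_top_common_keywords_spec : Claim_equal_get_top_common_keywords := by
  intro actor1 actor2 _ hpre
  obtain ⟨hnd1, _⟩ := hpre
  show _ = _
  simp only [get_top_common_keywords, get_top_common_keywords_alt]
  set d2 := PySem.Dict.mk actor2 with hd2
  set d1 := PySem.Dict.mk actor1 with hd1
  set kw := d1.keys.foldl (fun (acc : PySem.Dict String Int) k =>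
      if d2.contains k then acc.insert k (min (d1.getD k 0) (d2.getD k 0)) else acc) PySem.Dict.empty with hkw
  have hitems : kw.items = ((actor1.map Prod.fst).filter (fun k => d2.contains k)).map
      (fun k => (k, min (d1.getD k 0) (d2.getD k 0))) := kw_items actor1 d2 hnd1
  have hkeys : kw.keys = (actor1.map Prod.fst).filter (fun k => d2.contains k) := by
    show kw.items.map Prod.fst = _
    rw [hitems, List.map_map]
    simp [Function.comp_def]
  have hknd : kw.keys.Nodup := by
    rw [hkeys]; exact hnd1.filter _
  have hgetD : ∀ t ∈ pvCommon actor1 d2, kw.getD t.1 0 = min t.2.1 t.2.2 := by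
    intro t ht
    obtain ⟨h1, h2⟩ := mem_pvCommon ht hnd1
    have ht1 : t.1 ∈ (actor1.map Prod.fst).filter (fun k => d2.contains k) := by
      rw [← map_fst_pvCommon actor1 d2]; exact List.mem_map_of_mem ht
    have : (t.1, min (d1.getD t.1 0) (d2.getD t.1 0)) ∈ kw.items := by
      rw [hitems]; exact List.mem_map_of_mem ht1
    rw [PySem.Dict.getD_of_mem_items _ this hknd 0, h1, h2]
  -- B's fold is the truncated insertion sort of pvCommon
  have hB : actor1.foldl (fun (acc : List (String × Int × Int)) kv =>
        if d2.contains kv.1 then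
          (pvBestIns (min kv.2 (d2.getD kv.1 0)) (kv.1, kv.2, d2.getD kv.1 0) acc).take 10
        else acc) []
      = (PySem.List.sorted (pvCommon actor1 d2) (fun t => min t.2.1 t.2.2) true).take 10 := by
    rw [foldl_if_filter, PySem.List.sorted_rev_eq_foldl_insertBy]
    have hstep : (actor1.filter (fun kv => d2.contains kv.1)).foldl
        (fun (acc : List (String × Int × Int)) kv =>
          (pvBestIns (min kv.2 (d2.getD kv.1 0)) (kv.1, kv.2, d2.getD kv.1 0) acc).take 10) []
        = (pvCommon actor1 d2).foldl
          (fun acc t => (PySem.List.insertBy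
              (fun a b => decide (min b.2.1 b.2.2 < min a.2.1 a.2.2)) t acc).take 10) [] := by
      rw [pvCommon, List.foldl_map]
      apply PySem.List.foldl_congr_mem
      intro acc kv _
      exact congrArg (List.take 10) (pvBestIns_eq_insertBy (kv.1, kv.2, d2.getD kv.1 0) acc)
    rw [hstep, trunc_fold]
  -- A's sorted key list is the fst-projection of B's sorted triple list
  have hsort : PySem.List.sorted kw.keys (fun k => kw.getD k 0) true
      = (PySem.List.sorted (pvCommon actor1 d2) (fun t => min t.2.1 t.2.2) true).map (·.1) := by
    rw [map_fst_sorted (fun t => min t.2.1 t.2.2) (fun k => kw.getD k 0) _ hgetD,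
        map_fst_pvCommon, hkeys]
  rw [hB, hsort, ← List.map_take, List.map_map]
  apply List.map_congr_left
  intro t ht
  have htc : t ∈ pvCommon actor1 d2 := by
    have := List.mem_of_mem_take ht
    rwa [PySem.List.mem_sorted] at this
  obtain ⟨h1, h2⟩ := mem_pvCommon htc hnd1
  rw [← hd1] at h1
  simp [h1, h2]
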